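-- pv_equiv track=rewrite | github.com/bhasker506/problem_solving | segregate_one.py | segreagte
-- ===== SOURCE A (Python) =====
-- from typing import List
--
-- def segreagte(arr: List) -> List:
--     if not arr:
--         return None
--     one_counter = 0
--     loop_counter = 0
--
--     while loop_counter < len(arr):
--         if arr[loop_counter] == 1:
--             arr[loop_counter] = 0
--             arr[one_counter] = 1
--             one_counter += 1
--         loop_counter += 1
--     return arr
-- ===== SOURCE B (Python) =====
-- from typing import List
--
-- def segreagte(arr: List) -> List:
--     if not arr:
--         return None
--     c = arr.count(1)
--     for i in range(c):
--         arr[i] = 1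
--     for i in range(c, len(arr)):
--         if arr[i] == 1:
--             arr[i] = 0
--     return arr
-- ===== Notes on version B (the rewrite author's own statement) =====
-- stated objective: simpler
-- what changed: Replaces A's single-pass write-ahead two-pointer loop with a count of the 1s followed by two shaped fill passes: fill the first c slots with 1, then zero only the 1s in the tail.
import Mathlib
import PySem

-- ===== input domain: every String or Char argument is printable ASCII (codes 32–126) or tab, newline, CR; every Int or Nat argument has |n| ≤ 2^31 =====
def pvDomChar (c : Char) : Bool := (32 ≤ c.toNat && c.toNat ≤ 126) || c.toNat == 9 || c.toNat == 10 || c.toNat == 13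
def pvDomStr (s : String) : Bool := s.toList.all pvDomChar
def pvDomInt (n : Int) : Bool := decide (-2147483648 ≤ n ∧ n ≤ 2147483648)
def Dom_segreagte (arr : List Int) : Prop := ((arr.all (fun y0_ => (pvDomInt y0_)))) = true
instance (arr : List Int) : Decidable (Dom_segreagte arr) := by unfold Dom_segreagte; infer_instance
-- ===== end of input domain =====

-- B replaces A's single-pass write-ahead two-pointer loop by a count of the 1s plus two
-- shaped fill passes (objective: simpler). Both Pythons mutate arr in place identically and
-- return the same object; the equivalence proved here is about the returned list value.

-- ===== PORT A =====
-- while loop ported as fuel recursion (fuel = arr.length, one step per loop iteration);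
-- arr[loop_counter] is read with getD, exact here since the loop guard keeps the index in range.
def segLoopA : Nat → List Int → Nat → Nat → List Int
  | 0, a, _, _ => a
  | fuel + 1, a, one, lp =>
    if lp < a.length then
      if a.getD lp 0 = 1 then
        segLoopA fuel ((a.set lp 0).set one 1) (one + 1) (lp + 1)
      else
        segLoopA fuel a one (lp + 1)
    else a

def segreagte (arr : List Int) : Option (List Int) :=
  if arr = [] then none
  else some (segLoopA arr.length arr 0 0)

-- ===== PORT B =====
-- c = arr.count(1); for i in range(c): arr[i] = 1; for i in range(c, len(arr)): if arr[i]==1: arr[i]=0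
def segreagte_alt (arr : List Int) : Option (List Int) :=
  if arr = [] then none
  else
    let c := PySem.List.count arr 1
    let a1 := (List.range c).foldl (fun a i => a.set i 1) arr
    let a2 := (List.range' c (arr.length - c)).foldl
      (fun a i => if a.getD i 0 = 1 then a.set i 0 else a) a1
    some a2

-- ===== PRECONDITION & SPEC =====
def Spec_segreagte (arr : List Int) (out : Option (List Int)) : Prop := out = segreagte_alt arr
instance (arr : List Int) (out : Option (List Int)) : Decidable (Spec_segreagte arr out) := by unfold Spec_segreagte; infer_instance

-- ===== CLAIM (what is proved, stated in full; the proofs are below) =====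
def Claim_equal_segreagte : Prop := ∀ (arr : List Int), Dom_segreagte arr → Spec_segreagte arr (segreagte arr)

-- ===== LEMMAS AND PROOFS =====

-- the value written past the 1-prefix: original value, with 1s zeroed
def segF (x : Int) : Int := if x = 1 then 0 else x

-- abstract trace of A's loop body: mid is the window between the two pointers
def segOut : List Int → List Int → List Int
  | mid, [] => mid
  | [], x :: t => if x = 1 then 1 :: segOut [] t else segOut [x] t
  | m :: ms, x :: t => if x = 1 then 1 :: segOut (ms ++ [0]) t else segOut (m :: ms ++ [x]) t

theorem getD_at_len (p t : List Int) (x : Int) :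
    (p ++ x :: t).getD p.length 0 = x := by
  induction p with
  | nil => simp
  | cons a p ih => simpa using ih

theorem set_at_len (p t : List Int) (x v : Int) :
    (p ++ x :: t).set p.length v = p ++ v :: t := by
  induction p with
  | nil => simp
  | cons a p ih => simpa using ih

theorem segOut_spec (t : List Int) : ∀ mid : List Int,
    segOut mid t = List.replicate (t.count 1) 1 ++ (mid ++ t.map segF).drop (t.count 1) := by
  induction t with
  | nil => intro mid; simp [segOut]
  | cons x t ih =>
    intro mid
    by_cases hx : x = 1
    · subst hx
      match mid with
      | [] =>
        simp [segOut, ih, List.count_cons, segF, List.replicate_succ]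
      | m :: ms =>
        simp [segOut, ih, List.count_cons, segF, List.replicate_succ]
    · match mid with
      | [] =>
        simp [segOut, hx, ih, List.count_cons, segF]
      | m :: ms =>
        simp [segOut, hx, ih, List.count_cons, segF]

theorem segLoopA_eq (tail : List Int) : ∀ (one : Nat) (mid : List Int),
    segLoopA tail.length (List.replicate one 1 ++ (mid ++ tail)) one (one + mid.length)
      = List.replicate one 1 ++ segOut mid tail := by
  induction tail with
  | nil => intro one mid; simp [segLoopA, segOut]
  | cons x t ih =>
    intro one mid
    have hlt : one + mid.length < (List.replicate one (1:Int) ++ (mid ++ x :: t)).length := by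
      simp only [List.length_append, List.length_replicate, List.length_cons]; omega
    have hget : (List.replicate one (1:Int) ++ (mid ++ x :: t)).getD (one + mid.length) 0 = x := by
      simpa [List.append_assoc] using getD_at_len (List.replicate one (1:Int) ++ mid) t x
    simp only [List.length_cons, segLoopA]
    rw [if_pos hlt, hget]
    by_cases hx : x = 1
    · subst hx
      rw [if_pos rfl]
      have hset1 : (List.replicate one (1:Int) ++ (mid ++ (1:Int) :: t)).set (one + mid.length) 0
          = List.replicate one 1 ++ (mid ++ (0:Int) :: t) := by
        simpa [List.append_assoc] using set_at_len (List.replicate one (1:Int) ++ mid) t 1 0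
      rw [hset1]
      match mid with
      | [] =>
        have hset2 : (List.replicate one (1:Int) ++ ([] ++ (0:Int) :: t)).set one 1
            = List.replicate (one+1) 1 ++ ([] ++ t) := by
          simpa [List.replicate_succ'] using set_at_len (List.replicate one (1:Int)) t 0 1
        rw [hset2, show one + List.length ([] : List Int) + 1
              = (one + 1) + List.length ([] : List Int) from by simp]
        rw [ih (one+1) []]
        simp [segOut, List.replicate_succ']
      | m :: ms =>
        have hset2 : (List.replicate one (1:Int) ++ (m :: ms ++ (0:Int) :: t)).set one 1
            = List.replicate (one+1) 1 ++ ((ms ++ [0]) ++ t) := by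
          simpa [List.replicate_succ', List.append_assoc] using
            set_at_len (List.replicate one (1:Int)) (ms ++ (0:Int) :: t) m 1
        rw [hset2, show one + List.length (m :: ms) + 1
              = (one + 1) + List.length (ms ++ [(0:Int)]) from by simp; omega]
        rw [ih (one+1) (ms ++ [0])]
        simp [segOut, List.replicate_succ', List.append_assoc]
    · rw [if_neg hx]
      rw [show (List.replicate one (1:Int) ++ (mid ++ x :: t))
            = (List.replicate one 1 ++ ((mid ++ [x]) ++ t)) from by simp]
      rw [show one + mid.length + 1 = one + (mid ++ [x]).length from by
            simp only [List.length_append, List.length_cons, List.length_nil]; omega]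
      rw [ih one (mid ++ [x])]
      match mid with
      | [] => simp [segOut, hx]
      | m :: ms => simp [segOut, hx]

theorem fill_eq (l : List Int) : ∀ (c : Nat), c ≤ l.length →
    (List.range c).foldl (fun a i => a.set i 1) l
      = List.replicate c 1 ++ l.drop c := by
  intro c
  induction c with
  | zero => intro _; simp
  | succ c ih =>
    intro hc
    have hc' : c < l.length := by omega
    rw [List.range_succ, List.foldl_append, ih (by omega)]
    simp only [List.foldl_cons, List.foldl_nil]
    have hdrop : l.drop c = l[c] :: l.drop (c + 1) := List.drop_eq_getElem_cons hc'
    rw [hdrop]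
    have := set_at_len (List.replicate c (1 : Int)) (l.drop (c+1)) (l[c]) 1
    simp only [List.length_replicate] at this
    rw [this, List.replicate_succ', List.append_assoc]
    simp

theorem zero_eq (rest : List Int) : ∀ (pre : List Int),
    (List.range' pre.length rest.length).foldl
        (fun a i => if a.getD i 0 = 1 then a.set i 0 else a) (pre ++ rest)
      = pre ++ rest.map segF := by
  induction rest with
  | nil => intro pre; simp
  | cons x t ih =>
    intro pre
    rw [List.length_cons, List.range'_succ, List.foldl_cons]
    rw [getD_at_len pre t x]
    by_cases hx : x = 1
    · subst hx
      rw [if_pos rfl, set_at_len pre t 1 0]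
      have := ih (pre ++ [0])
      simpa [segF, List.append_assoc] using this
    · rw [if_neg hx]
      have := ih (pre ++ [x])
      simpa [segF, hx, List.append_assoc] using this

theorem closed_form (arr : List Int) :
    segLoopA arr.length arr 0 0
      = List.replicate (arr.count 1) 1 ++ (arr.map segF).drop (arr.count 1) := by
  have h := segLoopA_eq arr 0 []
  simp only [List.replicate_zero, List.nil_append, List.length_nil, Nat.add_zero] at h
  rw [h]
  have := segOut_spec arr []
  simpa using this

-- ===== VERDICT (by name: the statement is the Claim_ definition above) =====
theorem segreagte_spec : Claim_equal_segreagte := by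
  intro arr _
  unfold Spec_segreagte segreagte segreagte_alt
  by_cases h : arr = []
  · simp [h]
  · simp only [if_neg h]
    rw [closed_form]
    have hc : PySem.List.count arr 1 = arr.count 1 := PySem.List.count_eq arr 1
    have hle : arr.count 1 ≤ arr.length := List.count_le_length
    rw [hc, fill_eq arr (arr.count 1) hle]
    have hz := zero_eq (arr.drop (arr.count 1)) (List.replicate (arr.count 1) 1)
    simp only [List.length_replicate, List.length_drop] at hz
    rw [hz]
    simp [List.map_drop]
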